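-- pv_equiv track=rewrite | github.com/dcherian/zarr-python | tests/v3/test_properties.py | generate_prefix_paths
-- ===== SOURCE A (Python) =====
-- from collections.abc import Sequence
--
-- def generate_prefix_paths(path: str) -> Sequence[str]:
--     if path == "/":
--         return ["/"]
--     parts = path.split("/")
--     prefixes = []
--     for i in range(1, len(parts) + 1):
--         prefixes.append("/".join(parts[:i]))
--     return prefixes
-- ===== SOURCE B (Python) =====
-- def generate_prefix_paths(path: str):
--     if path == "/":
--         return ["/"]
--     prefixes = []
--     acc = ""
--     for c in path:
--         if c == "/":
--             prefixes.append(acc)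
--         acc += c
--     prefixes.append(acc)
--     return prefixes
-- ===== Notes on version B (the rewrite author's own statement) =====
-- stated objective: alternative
-- what changed: B replaces split('/') plus a quadratic join-of-prefix-slices loop with a single left-to-right character scan that emits the accumulated prefix at each '/' and the whole path at the end.
import Mathlib
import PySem

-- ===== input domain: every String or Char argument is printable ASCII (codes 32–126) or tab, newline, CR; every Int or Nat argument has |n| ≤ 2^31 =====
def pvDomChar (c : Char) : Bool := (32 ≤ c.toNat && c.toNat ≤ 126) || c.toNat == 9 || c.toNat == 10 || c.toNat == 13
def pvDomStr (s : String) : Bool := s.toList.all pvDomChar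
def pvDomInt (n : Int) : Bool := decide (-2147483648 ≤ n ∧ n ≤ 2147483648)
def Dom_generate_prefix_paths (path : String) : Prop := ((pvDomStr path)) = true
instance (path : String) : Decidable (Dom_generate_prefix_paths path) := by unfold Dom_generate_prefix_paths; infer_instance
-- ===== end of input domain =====

-- B replaces split("/") plus a join-of-prefix-slices loop with a single character scan that
-- emits the accumulated prefix at each '/' (objective: alternative, same return value).

-- ===== PORT A =====
-- path.split("/"): the separator "/" is nonempty, so PySem.Str.split? always returns some; .getD [] unwraps it.
def generate_prefix_paths (path : String) : List String :=
  if path = "/" then ["/"]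
  else
    let parts := (PySem.Str.split? path "/").getD []
    (PySem.List.pyRange 1 ((parts.length : Int) + 1)).foldl
      (fun prefixes i => prefixes ++ [PySem.Str.join "/" (PySem.List.slice parts none (some i))]) []

-- ===== PORT B =====
-- the scan works on the character list; String.ofList rebuilds each accumulated prefix
def generate_prefix_paths_alt (path : String) : List String :=
  if path = "/" then ["/"]
  else
    let st := path.toList.foldl
      (fun (st : List (List Char) × List Char) c =>
        (if c = '/' then st.1 ++ [st.2] else st.1, st.2 ++ [c])) ([], [])
    (st.1 ++ [st.2]).map String.ofList

-- ===== PRECONDITION & SPEC =====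
def Spec_generate_prefix_paths (path : String) (out : List String) : Prop := out = generate_prefix_paths_alt path
instance (path : String) (out : List String) : Decidable (Spec_generate_prefix_paths path out) := by unfold Spec_generate_prefix_paths; infer_instance

-- ===== CLAIM (what is proved, stated in full; the proofs are below) =====
def Claim_equal_generate_prefix_paths : Prop := ∀ (path : String), Dom_generate_prefix_paths path → Spec_generate_prefix_paths path (generate_prefix_paths path)

-- ===== LEMMAS AND PROOFS =====

-- structural version of str.split("/") on character lists
def mySplit : List Char → List (List Char)
  | [] => [[]]
  | c :: rest =>
    if c = '/' then [] :: mySplit rest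
    else
      match mySplit rest with
      | [] => [[c]]   -- unreachable: mySplit is never []
      | p :: ps => (c :: p) :: ps

-- prefixes emitted by B's scan, with the already-consumed prefix a0
def scanPref (a0 : List Char) : List Char → List (List Char)
  | [] => []
  | c :: rest => (if c = '/' then [a0] else []) ++ scanPref (a0 ++ [c]) rest

def consHead (pre : List Char) : List (List Char) → List (List Char)
  | [] => [pre]
  | p :: ps => (pre ++ p) :: ps

theorem mySplit_ne_nil (cs : List Char) : mySplit cs ≠ [] := by
  cases cs with
  | nil => simp [mySplit]
  | cons c rest =>
    simp only [mySplit]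
    split
    · simp
    · cases h : mySplit rest <;> simp

theorem go_spec (fuel : Nat) : ∀ (l cur : List Char) (hacc : List (List Char)),
    l.length ≤ fuel →
    PySem.Chars.splitOn.go ['/'] fuel l cur hacc = hacc.reverse ++ consHead cur.reverse (mySplit l) := by
  induction fuel with
  | zero =>
    intro l cur hacc hl
    have : l = [] := by cases l <;> simp_all
    subst this
    simp [PySem.Chars.splitOn.go, consHead, mySplit]
  | succ fuel ih =>
    intro l cur hacc hl
    cases l with
    | nil => simp [PySem.Chars.splitOn.go, consHead, mySplit]
    | cons c rest =>
      simp only [PySem.Chars.splitOn.go]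
      by_cases hc : c = '/'
      · subst hc
        rw [if_pos (by simp [List.isPrefixOf])]
        rw [ih _ _ _ (by simpa using Nat.le_of_succ_le_succ (by simpa using hl))]
        obtain ⟨p, ps, hm⟩ : ∃ p ps, mySplit rest = p :: ps := by
          cases h : mySplit rest with
          | nil => exact absurd h (mySplit_ne_nil rest)
          | cons p ps => exact ⟨p, ps, rfl⟩
        simp [mySplit, hm, consHead]
      · rw [if_neg (by simp [List.isPrefixOf]; exact fun h => hc h.symm)]
        rw [ih _ _ _ (by simpa using Nat.le_of_succ_le_succ (by simpa using hl))]
        obtain ⟨p, ps, hm⟩ : ∃ p ps, mySplit rest = p :: ps := by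
          cases h : mySplit rest with
          | nil => exact absurd h (mySplit_ne_nil rest)
          | cons p ps => exact ⟨p, ps, rfl⟩
        simp [mySplit, hm, consHead, hc]

theorem splitOn_eq_mySplit (cs : List Char) :
    PySem.Chars.splitOn cs ['/'] = mySplit cs := by
  rw [show PySem.Chars.splitOn cs ['/'] = PySem.Chars.splitOn.go ['/'] (cs.length + 1) cs [] [] from rfl]
  rw [go_spec _ _ _ _ (by omega)]
  obtain ⟨p, ps, hm⟩ : ∃ p ps, mySplit cs = p :: ps := by
    cases h : mySplit cs with
    | nil => exact absurd h (mySplit_ne_nil cs)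
    | cons p ps => exact ⟨p, ps, rfl⟩
  simp [hm, consHead]

theorem foldB (cs : List Char) : ∀ (r0 : List (List Char)) (a0 : List Char),
    cs.foldl (fun (st : List (List Char) × List Char) c =>
        (if c = '/' then st.1 ++ [st.2] else st.1, st.2 ++ [c])) (r0, a0)
      = (r0 ++ scanPref a0 cs, a0 ++ cs) := by
  induction cs with
  | nil => simp [scanPref]
  | cons c rest ih =>
    intro r0 a0
    simp only [List.foldl_cons, ih, scanPref]
    by_cases hc : c = '/' <;> simp [hc, List.append_assoc]

theorem join_cons_head (sep p : List Char) (c : Char) (l : List (List Char)) :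
    PySem.Chars.join sep ((c :: p) :: l) = c :: PySem.Chars.join sep (p :: l) := by
  cases l with
  | nil => simp [PySem.Chars.join_singleton]
  | cons q qs => simp [PySem.Chars.join_cons_cons]

theorem joinTake (cs : List Char) : ∀ (a0 : List Char),
    (List.range (mySplit cs).length).map
        (fun k => a0 ++ PySem.Chars.join ['/'] (List.take (k + 1) (mySplit cs)))
      = scanPref a0 cs ++ [a0 ++ cs] := by
  induction cs with
  | nil =>
    intro a0
    simp [mySplit, scanPref, PySem.Chars.join_singleton]
  | cons c rest ih =>
    intro a0
    obtain ⟨p, ps, hm⟩ : ∃ p ps, mySplit rest = p :: ps := by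
      cases h : mySplit rest with
      | nil => exact absurd h (mySplit_ne_nil rest)
      | cons p ps => exact ⟨p, ps, rfl⟩
    by_cases hc : c = '/'
    · subst hc
      have h1 : mySplit ('/' :: rest) = [] :: mySplit rest := by simp [mySplit]
      rw [h1]
      simp only [List.length_cons, List.range_succ_eq_map, List.map_cons, List.map_map]
      have htail : ∀ k ∈ List.range (mySplit rest).length,
          a0 ++ PySem.Chars.join ['/'] (List.take (Nat.succ k + 1) ([] :: mySplit rest))
            = (a0 ++ ['/']) ++ PySem.Chars.join ['/'] (List.take (k + 1) (mySplit rest)) := by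
        intro k hk
        simp only [List.mem_range] at hk
        obtain ⟨q, qs, ht⟩ : ∃ q qs, List.take (k+1) (mySplit rest) = q :: qs := by
          rw [hm]
          exact ⟨p, List.take k ps, by simp⟩
        simp only [Nat.succ_eq_add_one, List.take_succ_cons, ht,
          PySem.Chars.join_cons_cons]
        simp
      simp only [Function.comp_def]
      rw [List.map_congr_left htail]
      rw [ih (a0 ++ ['/'])]
      simp [scanPref, List.append_assoc]
    · have h1 : mySplit (c :: rest) = (c :: p) :: ps := by simp [mySplit, hc, hm]
      rw [h1]
      have hlen : ((c :: p) :: ps).length = (mySplit rest).length := by simp [hm]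
      rw [hlen]
      have hfun : ∀ k ∈ List.range (mySplit rest).length,
          a0 ++ PySem.Chars.join ['/'] (List.take (k + 1) ((c :: p) :: ps))
            = (a0 ++ [c]) ++ PySem.Chars.join ['/'] (List.take (k + 1) (mySplit rest)) := by
        intro k hk
        simp only [List.take_succ_cons, join_cons_head, hm]
        simp
      rw [List.map_congr_left hfun]
      rw [ih (a0 ++ [c])]
      simp [scanPref, hc, List.append_assoc]

theorem foldl_app {α β : Type} (xs : List α) (f : α → β) (init : List β) :
    xs.foldl (fun acc i => acc ++ [f i]) init = init ++ xs.map f := by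
  induction xs generalizing init with
  | nil => simp
  | cons x xs ih => simp [List.foldl, ih, List.append_assoc]

theorem ports_agree (path : String) : generate_prefix_paths path = generate_prefix_paths_alt path := by
  by_cases hp : path = "/"
  · simp [generate_prefix_paths, generate_prefix_paths_alt, hp]
  · set cs := path.toList with hcs
    obtain ⟨parts, hsome, hparts⟩ : ∃ parts, PySem.Str.split? path "/" = some parts ∧
        parts.map String.toList = mySplit cs := by
      have h := PySem.Str.split?_map path "/"
      rw [show ("/" : String).toList = ['/'] from rfl] at h
      rw [show PySem.Chars.split? cs ['/'] = some (PySem.Chars.splitOn cs ['/']) from by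
        simp [PySem.Chars.split?]] at h
      cases hs : PySem.Str.split? path "/" with
      | none => rw [hs] at h; simp at h
      | some l =>
        rw [hs] at h
        simp only [Option.map_some, Option.some_inj] at h
        exact ⟨l, rfl, by rw [h, splitOn_eq_mySplit]⟩
    have hlen : parts.length = (mySplit cs).length := by
      rw [← hparts, List.length_map]
    apply List.map_injective_iff.mpr (fun a b h => String.toList_inj.mp h)
    simp only [generate_prefix_paths, generate_prefix_paths_alt, if_neg hp, hsome,
      Option.getD_some]
    rw [foldl_app, PySem.List.pyRange_one]
    have hn : ((parts.length : Int) + 1 - 1).toNat = parts.length := by omega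
    rw [hn]
    rw [foldB]
    simp only [List.nil_append, List.map_map, List.map_append, List.map_cons, List.map_nil]
    have hc2 : ∀ k ∈ List.range parts.length,
        (String.toList ∘ (fun i => PySem.Str.join "/" (PySem.List.slice parts none (some i))) ∘ fun k : Nat => 1 + (k:Int)) k
          = PySem.Chars.join ['/'] (List.take (k+1) (mySplit cs)) := by
      intro k _
      simp only [Function.comp_apply]
      rw [PySem.List.slice_to parts (by omega : (0:Int) ≤ 1 + (k:Int))]
      rw [PySem.Str.toList_join]
      rw [show ((1:Int)+(k:Int)).toNat = k+1 from by omega]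
      rw [List.map_take, hparts]
      rfl
    rw [List.map_congr_left hc2]
    simp only [Function.comp_def, String.toList_ofList]
    rw [hlen]
    have hjt := joinTake cs []
    simp only [List.nil_append] at hjt
    rw [hjt]
    simp only [hcs, List.map_id']

-- ===== VERDICT (by name: the statement is the Claim_ definition above) =====
theorem generate_prefix_paths_spec : Claim_equal_generate_prefix_paths := by
  intro path _
  unfold Spec_generate_prefix_paths
  exact ports_agree path
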